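-- pv_equiv track=rewrite | github.com/MaraScott/ComfyUI_MaraScott_Nodes | py/inc/lib/array.py | reorder_edges_to_center
-- ===== SOURCE A (Python) =====
-- def reorder_edges_to_center(arr):
--     result = []
--     left = 0
--     right = len(arr) - 1
--
--     while left <= right:
--         if left == right:
--             result.append(arr[left])
--         else:
--             result.append(arr[left])
--             result.append(arr[right])
--         left += 1
--         right -= 1
--
--     return result
-- ===== SOURCE B (Python) =====
-- def reorder_edges_to_center(arr):
--     mid = (len(arr) + 1) // 2
--     front = arr[:mid]
--     back = arr[mid:][::-1]
--     result = []
--     for x, y in zip(front, back):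
--         result.append(x)
--         result.append(y)
--     if len(front) > len(back):
--         result.append(front[-1])
--     return result
-- ===== Notes on version B (the rewrite author's own statement) =====
-- stated objective: idiomatic
-- what changed: Replaces the two-pointer while loop with per-element indexing by slicing: take the front half and the reversed back half and zip-interleave them (bulk slice/zip operations instead of index bookkeeping), appending the middle element once for odd lengths.
import Mathlib
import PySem

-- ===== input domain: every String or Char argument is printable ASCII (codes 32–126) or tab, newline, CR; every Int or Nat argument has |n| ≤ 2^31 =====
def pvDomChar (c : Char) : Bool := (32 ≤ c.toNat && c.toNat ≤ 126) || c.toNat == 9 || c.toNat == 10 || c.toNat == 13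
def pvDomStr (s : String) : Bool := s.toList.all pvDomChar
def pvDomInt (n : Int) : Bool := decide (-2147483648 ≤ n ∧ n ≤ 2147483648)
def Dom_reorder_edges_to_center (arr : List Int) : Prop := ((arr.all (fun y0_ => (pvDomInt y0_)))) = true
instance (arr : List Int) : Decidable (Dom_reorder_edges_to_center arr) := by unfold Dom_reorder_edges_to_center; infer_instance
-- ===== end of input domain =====

-- B replaces A's two-pointer while loop by slicing into the front half and the reversed
-- back half and zip-interleaving them (idiomatic; same O(n) cost).

-- ===== PORT A =====
-- A's while loop with left/right pointers.  arr[left] / arr[right]: the loop keeps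
-- 0 ≤ left ≤ right < len(arr), so indexing never raises; getD with the in-range index is exact.
def pvLoopA (arr : List Int) (left right : Int) (res : List Int) : List Int :=
  if left ≤ right then
    if left = right then
      pvLoopA arr (left + 1) (right - 1) (res ++ [arr.getD left.toNat 0])
    else
      pvLoopA arr (left + 1) (right - 1)
        (res ++ [arr.getD left.toNat 0, arr.getD right.toNat 0])
  else res
termination_by (right + 1 - left).toNat
decreasing_by all_goals omega

def reorder_edges_to_center (arr : List Int) : List Int :=
  pvLoopA arr 0 ((arr.length : Int) - 1) []

-- ===== PORT B =====
-- mid = (len(arr)+1)//2: both operands nonneg, so Python's // is Nat division.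
-- front[-1] is only read when len(front) > len(back) ≥ 0, i.e. front ≠ [], so getLast! is exact.
def reorder_edges_to_center_alt (arr : List Int) : List Int :=
  let mid := (arr.length + 1) / 2
  let front := arr.take mid
  let back := (arr.drop mid).reverse
  let result := (front.zip back).foldl (fun r p => r ++ [p.1, p.2]) []
  if back.length < front.length then result ++ [front.getLast!] else result

-- ===== PRECONDITION & SPEC =====
def Spec_reorder_edges_to_center (arr : List Int) (out : List Int) : Prop := out = reorder_edges_to_center_alt arr
instance (arr : List Int) (out : List Int) : Decidable (Spec_reorder_edges_to_center arr out) := by unfold Spec_reorder_edges_to_center; infer_instance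

-- ===== CLAIM (what is proved, stated in full; the proofs are below) =====
def Claim_equal_reorder_edges_to_center : Prop := ∀ (arr : List Int), Dom_reorder_edges_to_center arr → Spec_reorder_edges_to_center arr (reorder_edges_to_center arr)

-- ===== LEMMAS AND PROOFS =====

-- Common middleman: the "head, last, recurse on the middle" interleaving.
def pvG : List Int → List Int
  | [] => []
  | [x] => [x]
  | x :: y :: rest =>
      x :: (y :: rest).getLast! :: pvG ((y :: rest).dropLast)
termination_by xs => xs.length
decreasing_by simp [List.length_dropLast]

theorem pvG_cons_snoc (x y : Int) (mid : List Int) :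
    pvG (x :: (mid ++ [y])) = x :: y :: pvG mid := by
  cases mid with
  | nil => simp [pvG]
  | cons a t =>
    rw [List.cons_append, pvG]
    have h1 : (a :: (t ++ [y])).getLast! = y := by
      rw [show a :: (t ++ [y]) = (a :: t) ++ [y] by rfl]
      exact List.getLast!_of_getLast? List.getLast?_concat
    have h2 : (a :: (t ++ [y])).dropLast = a :: t := by
      rw [show a :: (t ++ [y]) = (a :: t) ++ [y] by rfl, List.dropLast_concat]
    rw [h1, h2]

-- the segment arr[l : l+n]
def pvSeg (arr : List Int) (l n : Nat) : List Int := (arr.drop l).take n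

theorem pvSeg_cons (arr : List Int) (l n : Nat) (h : l < arr.length) :
    pvSeg arr l (n + 1) = arr.getD l 0 :: pvSeg arr (l + 1) n := by
  unfold pvSeg
  rw [List.drop_eq_getElem_cons h, List.take_succ_cons, List.getD_eq_getElem _ _ h]

theorem pvSeg_snoc (arr : List Int) (l n : Nat) (h : l + n < arr.length) :
    pvSeg arr l (n + 1) = pvSeg arr l n ++ [arr.getD (l + n) 0] := by
  unfold pvSeg
  rw [List.take_add_one, List.getElem?_drop, List.getElem?_eq_getElem h,
    List.getD_eq_getElem _ _ h]
  rfl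

-- A's loop computes pvG of the segment [l, l+n).
theorem pvLoopA_eq_pvG (arr : List Int) :
    ∀ (n : Nat) (l : Int) (res : List Int), 0 ≤ l → l + n ≤ arr.length →
      pvLoopA arr l (l + n - 1) res = res ++ pvG (pvSeg arr l.toNat n) := by
  intro n
  induction n using Nat.strong_induction_on with
  | _ n ih =>
    intro l res hl hn
    match n with
    | 0 =>
      rw [pvLoopA]
      simp only [show ¬ (l ≤ l + (0:Nat) - 1) by omega, if_false, pvSeg]
      simp [pvG]
    | 1 =>
      rw [pvLoopA]
      have h1 : l ≤ l + (1:Nat) - 1 := by omega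
      have h2 : l = l + (1:Nat) - 1 := by omega
      rw [if_pos h1, if_pos h2, pvLoopA, if_neg (by omega)]
      have hlt : l.toNat < arr.length := by omega
      rw [pvSeg_cons arr l.toNat 0 hlt]
      simp [pvSeg, pvG]
    | (m + 2) =>
      rw [pvLoopA]
      have h1 : l ≤ l + (↑(m + 2) : Int) - 1 := by push_cast; omega
      have h2 : ¬ (l = l + (↑(m + 2) : Int) - 1) := by push_cast; omega
      rw [if_pos h1, if_neg h2]
      have heq : l + (↑(m + 2) : Int) - 1 - 1 = (l + 1) + (↑m : Int) - 1 := by push_cast; omega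
      rw [heq, ih m (by omega) (l + 1) _ (by omega) (by push_cast at hn ⊢; omega)]
      have hseg : pvSeg arr l.toNat (m + 2)
          = arr.getD l.toNat 0 :: (pvSeg arr (l.toNat + 1) m ++ [arr.getD (l.toNat + 1 + m) 0]) := by
        rw [pvSeg_cons arr l.toNat (m + 1) (by omega), pvSeg_snoc arr (l.toNat + 1) m (by omega)]
      rw [hseg, pvG_cons_snoc]
      have ht1 : (l + 1).toNat = l.toNat + 1 := by omega
      have ht2 : (l + (↑(m + 2) : Int) - 1).toNat = l.toNat + 1 + m := by push_cast; omega
      rw [ht1, ht2]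
      simp

-- B's zip-interleave computes pvG of front ++ back.reverse.
theorem pvZip_eq_pvG :
    ∀ (back front : List Int), back.length ≤ front.length → front.length ≤ back.length + 1 →
      (front.zip back).flatMap (fun p => [p.1, p.2]) ++
        (if back.length < front.length then [front.getLast!] else [])
      = pvG (front ++ back.reverse) := by
  intro back
  induction back with
  | nil =>
    intro front _ h2
    match front, h2 with
    | [], _ => simp [pvG]
    | [x], _ => simp [pvG]
  | cons y ys ih =>
    intro front h1 h2
    match front with
    | [] => simp at h1
    | x :: ft =>
      simp only [List.zip_cons_cons, List.flatMap_cons, List.length_cons]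
      have hrw : x :: ft ++ (y :: ys).reverse = x :: ((ft ++ ys.reverse) ++ [y]) := by
        simp
      rw [hrw, pvG_cons_snoc,
        ← ih ft (by simpa using h1) (by simp at h2; omega)]
      by_cases h : ys.length < ft.length
      · have hft : ft ≠ [] := by intro he; simp [he] at h
        obtain ⟨a, t, rfl⟩ := List.exists_cons_of_ne_nil hft
        simp
      · simp [h]

theorem pvAlt_eq_pvG (arr : List Int) : reorder_edges_to_center_alt arr = pvG arr := by
  unfold reorder_edges_to_center_alt
  simp only
  rw [PySem.List.foldl_append_eq_flatMap, List.nil_append]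
  have hfl : (arr.take ((arr.length + 1) / 2)).length = (arr.length + 1) / 2 := by
    simp; omega
  have hbl : ((arr.drop ((arr.length + 1) / 2)).reverse).length = arr.length - (arr.length + 1) / 2 := by
    simp
  have key := pvZip_eq_pvG ((arr.drop ((arr.length + 1) / 2)).reverse) (arr.take ((arr.length + 1) / 2))
      (by rw [hfl, hbl]; omega) (by rw [hfl, hbl]; omega)
  rw [List.reverse_reverse, List.take_append_drop] at key
  rw [← key]
  split
  · rfl
  · simp

-- ===== VERDICT (by name: the statement is the Claim_ definition above) =====
theorem reorder_edges_to_center_spec : Claim_equal_reorder_edges_to_center := by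
  intro arr _
  unfold Spec_reorder_edges_to_center reorder_edges_to_center
  have h := pvLoopA_eq_pvG arr arr.length 0 [] le_rfl (by simp)
  rw [zero_add] at h
  rw [h, pvAlt_eq_pvG]
  simp [pvSeg]
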